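-- pv_equiv track=rewrite | github.com/Infrapink/calconv | yerm128.py | sny
-- ===== SOURCE A (Python) =====
-- solar_epoch = 1721426 - 375
--
-- s4 = (4 * 365) + 1
--
-- s128 = (32 * s4) - 1
--
-- def syl(year):
--     '''Compute the length of the solar year'''
--     year = int(year)
--
--     if (year % 128 == 0):
--         # not a leap year
--         ans = 365
--     elif (year % 4 == 0):
--         # leap year
--         ans = 366
--     else:
--         # not a leap year
--         ans = 365
--
--     return ans
--
-- def sny(year):
--     '''Compute solar new year for a given year'''
--     year = int(year)
--
--     cycles = year // 128
--     y = 128 * cycles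
--     nyd = solar_epoch + (s128 * cycles)
--
--     if (y + 4 <= year):
--         nyd += (4 * 365)
--         y += 4
--
--     while (y + 4 <= year):
--         y += 4
--         nyd += s4
--
--     while (y < year):
--         nyd += syl(year)
--         y += 1
--
--     return nyd
-- ===== SOURCE B (Python) =====
-- solar_epoch = 1721426 - 375
--
-- s4 = (4 * 365) + 1
--
-- s128 = (32 * s4) - 1
--
-- def sny(year):
--     '''Compute solar new year for a given year'''
--     year = int(year)
--     cycles, r = divmod(year, 128)
--     q, rem = divmod(r, 4)
--     nyd = solar_epoch + s128 * cycles
--     if q >= 1: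
--         # the first 4-year block of a cycle contributes 4*365 days, later ones s4
--         nyd += 1460 + s4 * (q - 1)
--     return nyd + 365 * rem
-- ===== Notes on version B (the rewrite author's own statement) =====
-- stated objective: simpler
-- what changed: Replaced A's two while loops with closed-form divmod arithmetic: the cycle count, four-year-block count and remaining-years count are computed directly and combined in one constant expression (the tail term uses a plain year-length constant, which is valid because a nonzero remainder means the year is not a leap year).
import Mathlib
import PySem

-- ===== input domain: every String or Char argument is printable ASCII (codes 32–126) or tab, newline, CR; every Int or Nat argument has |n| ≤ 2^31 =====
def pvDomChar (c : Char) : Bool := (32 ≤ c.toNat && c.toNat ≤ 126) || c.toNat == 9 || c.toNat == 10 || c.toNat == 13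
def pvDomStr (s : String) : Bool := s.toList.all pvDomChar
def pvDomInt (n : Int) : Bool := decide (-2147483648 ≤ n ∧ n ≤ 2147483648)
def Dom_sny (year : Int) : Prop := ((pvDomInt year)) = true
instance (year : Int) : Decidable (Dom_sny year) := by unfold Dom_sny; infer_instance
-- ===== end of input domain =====

-- B replaces A's while loops by closed-form divmod arithmetic (same return value; proved below).
-- ===== PORT A =====
def solar_epoch : Int := 1721426 - 375
def s4 : Int := (4 * 365) + 1
def s128 : Int := (32 * s4) - 1

def syl (year : Int) : Int :=
  if PySem.Int.mod year 128 = 0 then 365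
  else if PySem.Int.mod year 4 = 0 then 366
  else 365

-- the 'while (y + 4 <= year)' loop of A, returning the final (y, nyd)
def snyLoop1 (year y nyd : Int) : Int × Int :=
  if y + 4 ≤ year then snyLoop1 year (y + 4) (nyd + s4) else (y, nyd)
termination_by (year - y).toNat
decreasing_by omega

-- the 'while (y < year)' loop of A
def snyLoop2 (year y nyd : Int) : Int :=
  if y < year then snyLoop2 year (y + 1) (nyd + syl year) else nyd
termination_by (year - y).toNat
decreasing_by omega

def sny (year : Int) : Int :=
  let cycles := PySem.Int.floordiv year 128
  let y := 128 * cycles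
  let nyd := solar_epoch + s128 * cycles
  let (y, nyd) := if y + 4 ≤ year then (y + 4, nyd + 4 * 365) else (y, nyd)
  let (y, nyd) := snyLoop1 year y nyd
  snyLoop2 year y nyd

-- ===== PORT B =====
def sny_alt (year : Int) : Int :=
  let cycles := PySem.Int.floordiv year 128
  let r := PySem.Int.mod year 128
  let q := PySem.Int.floordiv r 4
  let rem := PySem.Int.mod r 4
  let nyd := solar_epoch + s128 * cycles
  let nyd := if 1 ≤ q then nyd + (1460 + s4 * (q - 1)) else nyd
  nyd + 365 * rem

-- ===== PRECONDITION & SPEC =====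
def Spec_sny (year : Int) (out : Int) : Prop := out = sny_alt year
instance (year : Int) (out : Int) : Decidable (Spec_sny year out) := by unfold Spec_sny; infer_instance

-- ===== CLAIM (what is proved, stated in full; the proofs are below) =====
def Claim_equal_sny : Prop := ∀ (year : Int), Dom_sny year → Spec_sny year (sny year)

-- ===== LEMMAS AND PROOFS =====

-- ===== VERDICT (by name: the statement is the Claim_ definition above) =====
theorem snyLoop1_eq (year y nyd : Int) :
    snyLoop1 year y nyd = (y + 4 * ((year - y).toNat / 4 : Nat), nyd + s4 * ((year - y).toNat / 4 : Nat)) := by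
  fun_induction snyLoop1 year y nyd with
  | case1 y nyd h ih =>
    rw [ih]
    have h4 : (year - y).toNat / 4 = (year - (y + 4)).toNat / 4 + 1 := by omega
    rw [Prod.mk.injEq]
    constructor <;> (simp [h4]; ring)
  | case2 y nyd h =>
    have h0 : (year - y).toNat / 4 = 0 := by omega
    simp [h0]

theorem snyLoop2_eq (year y nyd : Int) :
    snyLoop2 year y nyd = nyd + syl year * ((year - y).toNat : Nat) := by
  fun_induction snyLoop2 year y nyd with
  | case1 y nyd h ih =>
    rw [ih]
    have h1 : (year - y).toNat = (year - (y + 1)).toNat + 1 := by omega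
    simp [h1]
    ring
  | case2 y nyd h =>
    have h0 : (year - y).toNat = 0 := by omega
    simp [h0]

theorem sny_spec : Claim_equal_sny := by
  intro year _
  unfold Spec_sny sny sny_alt
  simp only [snyLoop1_eq, snyLoop2_eq]
  have hfd : PySem.Int.floordiv year 128 = year / 128 := PySem.Int.floordiv_eq_ediv_of_pos (by norm_num)
  have hmd : PySem.Int.mod year 128 = year % 128 := PySem.Int.mod_eq_emod_of_pos (by norm_num)
  have hfd4 : PySem.Int.floordiv (PySem.Int.mod year 128) 4 = (year % 128) / 4 := by
    rw [hmd]; exact PySem.Int.floordiv_eq_ediv_of_pos (by norm_num)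
  have hmd4 : PySem.Int.mod (PySem.Int.mod year 128) 4 = (year % 128) % 4 := by
    rw [hmd]; exact PySem.Int.mod_eq_emod_of_pos (by norm_num)
  have hsyl4 : PySem.Int.mod year 4 = year % 4 := PySem.Int.mod_eq_emod_of_pos (by norm_num)
  unfold syl
  rw [hfd, hfd4, hmd4, hmd, hsyl4]
  simp only [s4, s128, solar_epoch]
  split_ifs <;> push_cast <;> omega
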